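-- pv_equiv track=rewrite | github.com/romankostrov/urlcheckin | link_checker_desktop_pyside6.py | _guess_link_column
-- ===== SOURCE A (Python) =====
-- from typing import Dict, List, Optional, Tuple
--
-- def _guess_link_column(columns: List[str]) -> Optional[str]:
--     preferred = ["url", "link", "href", "ссылка", "ссылки"]
--     lowered = {c.lower(): c for c in columns}
--     for key in preferred:
--         for col_lower, original in lowered.items():
--             if key in col_lower:
--                 return original
--     return columns[0] if columns else None
-- ===== SOURCE B (Python) =====
-- from typing import List, Optional
--
-- def _rank(preferred, col_lower):
--     for i, key in enumerate(preferred):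
--         if key in col_lower:
--             return i
--     return None
--
-- def _guess_link_column(columns: List[str]) -> Optional[str]:
--     preferred = ["url", "link", "href", "ссылка", "ссылки"]
--     lowered = {c.lower(): c for c in columns}
--     best = None
--     best_rank = len(preferred)
--     for col_lower, original in lowered.items():
--         r = _rank(preferred, col_lower)
--         if r is not None and r < best_rank:
--             best, best_rank = original, r
--     return best if best is not None else (columns[0] if columns else None)
-- ===== Notes on version B (the rewrite author's own statement) =====
-- stated objective: alternative
-- what changed: Replaces A's preferred-outer/columns-inner double loop with early return by a single pass over the lowered dict that ranks each column by its first matching preferred key and keeps the strictly-best (earliest-rank, then earliest-column) one.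
import Mathlib
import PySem

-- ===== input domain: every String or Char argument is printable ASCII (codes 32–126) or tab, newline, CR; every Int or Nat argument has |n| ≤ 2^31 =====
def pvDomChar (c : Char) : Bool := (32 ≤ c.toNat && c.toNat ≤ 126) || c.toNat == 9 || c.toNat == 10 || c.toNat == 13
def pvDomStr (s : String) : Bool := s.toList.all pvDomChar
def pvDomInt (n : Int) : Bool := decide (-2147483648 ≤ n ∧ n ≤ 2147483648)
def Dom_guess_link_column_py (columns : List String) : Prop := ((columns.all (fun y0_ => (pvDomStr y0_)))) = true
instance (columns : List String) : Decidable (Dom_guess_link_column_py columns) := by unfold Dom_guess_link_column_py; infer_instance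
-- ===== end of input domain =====

-- B replaces A's preferred-outer/columns-inner early-return double loop by a single pass over the
-- columns that ranks each column (first matching preferred key) and keeps the strictly-best one;
-- objective: alternative decomposition, same cost.

def pvPreferred : List String := ["url", "link", "href", "ссылка", "ссылки"]

-- ===== PORT A =====
-- inner 'for col_lower, original in lowered.items(): if key in col_lower: return original'
def pvAInner (key : String) : List (String × String) → Option String
  | [] => none
  | (l, o) :: rest => if PySem.Str.isIn key l then some o else pvAInner key rest

-- outer 'for key in preferred' with early return
def pvAOuter (items : List (String × String)) : List String → Option String
  | [] => none
  | k :: ks => (pvAInner k items).or (pvAOuter items ks)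

def guess_link_column_py (columns : List String) : Option String :=
  let lowered := columns.foldl (fun d c => d.insert (PySem.Str.lower c) c) PySem.Dict.empty
  (pvAOuter lowered.items pvPreferred).or columns.head?

-- ===== PORT B =====
-- '_rank(preferred, col_lower)': index of the first preferred key occurring in col_lower
def pvRank : List String → String → Option Nat
  | [], _ => none
  | k :: ks, l => if PySem.Str.isIn k l then some 0 else (pvRank ks l).map (· + 1)

-- one iteration of B's single loop: update (best, best_rank) on a strictly smaller rank
def pvBStep (st : Option String × Nat) (it : String × String) : Option String × Nat :=
  match pvRank pvPreferred it.1 with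
  | some r => if r < st.2 then (some it.2, r) else st
  | none => st

def guess_link_column_py_alt (columns : List String) : Option String :=
  let lowered := columns.foldl (fun d c => d.insert (PySem.Str.lower c) c) PySem.Dict.empty
  let res := lowered.items.foldl pvBStep (none, pvPreferred.length)
  res.1.or columns.head?

-- ===== PRECONDITION & SPEC =====
def Spec_guess_link_column_py (columns : List String) (out : Option String) : Prop := out = guess_link_column_py_alt columns
instance (columns : List String) (out : Option String) : Decidable (Spec_guess_link_column_py columns out) := by unfold Spec_guess_link_column_py; infer_instance

-- ===== CLAIM (what is proved, stated in full; the proofs are below) =====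
def Claim_equal_guess_link_column_py : Prop := ∀ (columns : List String), Dom_guess_link_column_py columns → Spec_guess_link_column_py columns (guess_link_column_py columns)

-- ===== LEMMAS AND PROOFS =====

theorem pvAOuter_nil (P : List String) : pvAOuter [] P = none := by
  induction P with
  | nil => rfl
  | cons k ks ih => simp [pvAOuter, pvAInner, ih]

theorem pvRank_take_none {P : List String} {l : String} (h : pvRank P l = none) (n : Nat) :
    pvRank (P.take n) l = none := by
  induction P generalizing n with
  | nil => simp [pvRank]
  | cons k ks ih =>
    simp only [pvRank] at h
    by_cases hk : PySem.Str.isIn k l = true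
    · rw [if_pos hk] at h; exact absurd h (by simp)
    · rw [if_neg hk] at h
      rw [Option.map_eq_none_iff] at h
      cases n with
      | zero => simp [pvRank]
      | succ m =>
        simp only [List.take_succ_cons, pvRank]
        rw [if_neg hk, ih h]
        rfl

theorem pvRank_take_ge {P : List String} {l : String} {r : Nat} (h : pvRank P l = some r)
    {n : Nat} (hn : n ≤ r) : pvRank (P.take n) l = none := by
  induction P generalizing r n with
  | nil => simp [pvRank] at h
  | cons k ks ih =>
    simp only [pvRank] at h
    by_cases hk : PySem.Str.isIn k l = true
    · rw [if_pos hk] at h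
      obtain rfl : r = 0 := by simpa using h.symm
      obtain rfl : n = 0 := by omega
      simp [pvRank]
    · rw [if_neg hk] at h
      rw [Option.map_eq_some_iff] at h
      obtain ⟨r', hr', hrr⟩ := h
      cases n with
      | zero => simp [pvRank]
      | succ m =>
        simp only [List.take_succ_cons, pvRank]
        rw [if_neg hk, ih hr' (by omega)]
        rfl

theorem pvRank_take_lt {P : List String} {l : String} {r : Nat} (h : pvRank P l = some r)
    {n : Nat} (hn : r < n) : pvRank (P.take n) l = some r := by
  induction P generalizing r n with
  | nil => simp [pvRank] at h
  | cons k ks ih =>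
    simp only [pvRank] at h
    by_cases hk : PySem.Str.isIn k l = true
    · rw [if_pos hk] at h
      cases n with
      | zero => omega
      | succ m =>
        simp only [List.take_succ_cons, pvRank]
        rw [if_pos hk, h]
    · rw [if_neg hk] at h
      rw [Option.map_eq_some_iff] at h
      obtain ⟨r', hr', hrr⟩ := h
      cases n with
      | zero => omega
      | succ m =>
        simp only [List.take_succ_cons, pvRank]
        rw [if_neg hk, ih hr' (show r' < m by omega)]
        simp [hrr]

theorem pvAOuter_cons_none {P : List String} {l : String} (h : pvRank P l = none)
    (o : String) (xs : List (String × String)) :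
    pvAOuter ((l, o) :: xs) P = pvAOuter xs P := by
  induction P with
  | nil => rfl
  | cons k ks ih =>
    simp only [pvRank] at h
    by_cases hk : PySem.Str.isIn k l = true
    · rw [if_pos hk] at h; exact absurd h (by simp)
    · rw [if_neg hk] at h
      rw [Option.map_eq_none_iff] at h
      simp only [pvAOuter, pvAInner]
      rw [if_neg hk, ih h]

theorem pvAOuter_cons_some {P : List String} {l : String} {r : Nat} (h : pvRank P l = some r)
    (o : String) (xs : List (String × String)) :
    pvAOuter ((l, o) :: xs) P = (pvAOuter xs (P.take r)).or (some o) := by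
  induction P generalizing r with
  | nil => simp [pvRank] at h
  | cons k ks ih =>
    simp only [pvRank] at h
    by_cases hk : PySem.Str.isIn k l = true
    · rw [if_pos hk] at h
      obtain rfl : r = 0 := by simpa using h.symm
      simp only [pvAOuter, pvAInner, List.take_zero]
      rw [if_pos hk]
      simp
    · rw [if_neg hk] at h
      rw [Option.map_eq_some_iff] at h
      obtain ⟨r', hr', hrr⟩ := h
      subst hrr
      simp only [pvAOuter, pvAInner, List.take_succ_cons]
      rw [if_neg hk, ih hr', Option.or_assoc]

theorem pvFold_eq (xs : List (String × String)) :
    ∀ (b0 : Option String) (r0 : Nat),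
    (xs.foldl pvBStep (b0, r0)).1 = (pvAOuter xs (pvPreferred.take r0)).or b0 := by
  induction xs with
  | nil => intro b0 r0; simp [pvAOuter_nil]
  | cons x xs ih =>
    intro b0 r0
    obtain ⟨l, o⟩ := x
    simp only [List.foldl_cons]
    rcases h : pvRank pvPreferred l with _ | r
    · rw [show pvBStep (b0, r0) (l, o) = (b0, r0) by simp [pvBStep, h]]
      rw [ih, pvAOuter_cons_none (pvRank_take_none h r0)]
    · by_cases hlt : r < r0
      · rw [show pvBStep (b0, r0) (l, o) = (some o, r) by simp [pvBStep, h, hlt]]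
        rw [ih, pvAOuter_cons_some (pvRank_take_lt h hlt)]
        rw [List.take_take, show min r r0 = r by omega, Option.or_assoc]
        simp
      · rw [show pvBStep (b0, r0) (l, o) = (b0, r0) by simp [pvBStep, h, hlt]]
        rw [ih, pvAOuter_cons_none (pvRank_take_ge h (by omega))]

-- ===== VERDICT (by name: the statement is the Claim_ definition above) =====
theorem guess_link_column_py_spec : Claim_equal_guess_link_column_py := by
  intro columns _
  unfold Spec_guess_link_column_py guess_link_column_py guess_link_column_py_alt
  dsimp only
  rw [pvFold_eq, List.take_length, Option.or_none]
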